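-- pv_equiv track=rewrite | github.com/carlosmgc2003/hashdiff | hash.py | hallarDuplicados
-- ===== SOURCE A (Python) =====
-- def hallarDuplicados(dictHashes : dict) -> dict:
--     invertido = {}
--     for clave, valor in dictHashes.items():
--         if valor not in invertido:
--             invertido[valor] = [clave]
--         else:
--             invertido[valor].append(clave)
--     return invertido
-- ===== SOURCE B (Python) =====
-- def hallarDuplicados(dictHashes: dict) -> dict:
--     items = list(dictHashes.items())
--     return {valor: [clave for clave, v in items if v == valor]
--             for valor in dict.fromkeys(dictHashes.values())}
-- ===== Notes on version B (the rewrite author's own statement) =====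
-- stated objective: alternative
-- what changed: Instead of A's single pass that builds an inverted hash map of buckets and appends to them, B first lists the distinct values in first-occurrence order (dict.fromkeys) and then builds each group with one comprehension scan over the items per distinct value.
import Mathlib
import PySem

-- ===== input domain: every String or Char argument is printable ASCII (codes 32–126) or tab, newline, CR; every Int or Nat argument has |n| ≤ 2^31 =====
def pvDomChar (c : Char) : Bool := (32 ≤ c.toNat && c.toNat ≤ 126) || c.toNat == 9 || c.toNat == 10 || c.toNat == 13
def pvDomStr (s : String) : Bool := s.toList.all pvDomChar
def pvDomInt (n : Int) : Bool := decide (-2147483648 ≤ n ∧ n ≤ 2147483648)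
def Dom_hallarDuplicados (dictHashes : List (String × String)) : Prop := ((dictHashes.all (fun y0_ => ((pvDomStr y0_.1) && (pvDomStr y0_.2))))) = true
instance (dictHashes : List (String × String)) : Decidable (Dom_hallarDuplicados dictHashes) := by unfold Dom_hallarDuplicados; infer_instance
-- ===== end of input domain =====

-- B replaces A's single-pass inverted-bucket map with a value-dedup pass followed by one
-- filtering scan per distinct value (objective: alternative decomposition, not faster).

-- ===== PORT A =====
def hallarDuplicados (dictHashes : List (String × String)) : List (String × List String) :=
  (dictHashes.foldl
    (fun (invertido : PySem.Dict String (List String)) kv =>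
      if invertido.contains kv.2 = false then invertido.insert kv.2 [kv.1]
      else invertido.modify kv.2 [] (fun ks => ks ++ [kv.1]))
    PySem.Dict.empty).items

-- ===== PORT B =====
def hallarDuplicados_alt (dictHashes : List (String × String)) : List (String × List String) :=
  (PySem.List.dedup (dictHashes.map (fun kv => kv.2))).map
    (fun valor => (valor, (dictHashes.filter (fun kv => kv.2 == valor)).map (fun kv => kv.1)))

-- ===== PRECONDITION & SPEC =====
def Spec_hallarDuplicados (dictHashes : List (String × String)) (out : List (String × List String)) : Prop := out = hallarDuplicados_alt dictHashes
instance (dictHashes : List (String × String)) (out : List (String × List String)) : Decidable (Spec_hallarDuplicados dictHashes out) := by unfold Spec_hallarDuplicados; infer_instance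

-- ===== CLAIM (what is proved, stated in full; the proofs are below) =====
def Claim_equal_hallarDuplicados : Prop := ∀ (dictHashes : List (String × String)), Dom_hallarDuplicados dictHashes → Spec_hallarDuplicados dictHashes (hallarDuplicados dictHashes)

-- ===== LEMMAS AND PROOFS =====

-- A's two branches are one `modify`: on a missing key, inserting [k] is modifying from default [].
theorem hallarDuplicados_step_eq (d : PySem.Dict String (List String)) (k v : String) :
    (if d.contains v = false then d.insert v [k] else d.modify v [] (fun ks => ks ++ [k]))
      = d.modify v [] (fun ks => ks ++ [k]) := by
  by_cases h : d.contains v = false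
  · simp [PySem.Dict.modify, PySem.Dict.getD_of_not_contains, h]
  · simp [h]

theorem hallarDuplicados_eq_alt (l : List (String × String)) :
    hallarDuplicados l = hallarDuplicados_alt l := by
  unfold hallarDuplicados hallarDuplicados_alt
  simp only [hallarDuplicados_step_eq]
  have hswap : l.foldl (fun (d : PySem.Dict String (List String)) kv => d.modify kv.2 [] (fun ks => ks ++ [kv.1])) PySem.Dict.empty
      = (l.map (fun kv => (kv.2, kv.1))).foldl (fun d p => d.modify p.1 [] (fun ks => ks ++ [p.2])) PySem.Dict.empty := by
    rw [List.foldl_map]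
  rw [hswap]
  set L := l.map (fun kv => (kv.2, kv.1)) with hL
  have hnd : (L.foldl (fun (d : PySem.Dict String (List String)) p => d.modify p.1 [] (fun ks => ks ++ [p.2])) PySem.Dict.empty).keys.Nodup :=
    PySem.Dict.nodup_keys_foldl_modify_key L Prod.fst [] _ PySem.Dict.empty (by simp)
  rw [PySem.Dict.items_eq_map_keys _ hnd []]
  have hkeys : (L.foldl (fun (d : PySem.Dict String (List String)) p => d.modify p.1 [] (fun ks => ks ++ [p.2])) PySem.Dict.empty).keys
      = PySem.List.dedup (l.map (fun kv => kv.2)) := by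
    rw [PySem.Dict.keys_foldl_modify_key]
    simp [hL, List.map_map, Function.comp_def, PySem.Set.update, PySem.Set.ofList_eq_foldl]
  rw [hkeys]
  apply List.map_congr_left
  intro v hv
  congr 1
  rw [PySem.Dict.getD_foldl_modify_append]
  simp [hL, List.filter_map, List.map_map, Function.comp_def]

-- ===== VERDICT (by name: the statement is the Claim_ definition above) =====
theorem hallarDuplicados_spec : Claim_equal_hallarDuplicados := by
  intro l _
  exact hallarDuplicados_eq_alt l
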